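-- pv_equiv track=rewrite | github.com/gabiBettgenhaeuser/Benefit_MTL_Sequence_Labeling | utilities.py | convert_noprefix_to_bio_labels
-- ===== SOURCE A (Python) =====
-- def convert_noprefix_to_bio_labels(old_labels):
--     """ Converts a list of IO labels (e.g. ["O", "ORG", "PER", "PER"])
--     to BIO labels (["O", "B-ORG", "B-PER", "I-PER"]). IO labels contain
--     less information than BIO labels, so adjacent entities might
--     be joined (which is however very rare in practice).
--     """
--     outside_token = "O"
--
--     new_labels = []
--     for i, label in enumerate(old_labels):
--         if label == outside_token:
--             new_labels.append(outside_token)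
--         else:
--             if i > 0 and old_labels[i - 1] == label:
--                 new_labels.append("I-" + label)
--             else:
--                 new_labels.append("B-" + label)
--     return new_labels
-- ===== SOURCE B (Python) =====
-- def convert_noprefix_to_bio_labels(old_labels):
--     """Group-then-expand re-implementation: walk maximal runs of equal
--     labels; emit 'O' per element of an outside run, else one 'B-' plus
--     'I-' for the rest of the run."""
--     out = []
--     n = len(old_labels)
--     i = 0
--     while i < n:
--         label = old_labels[i]
--         j = i + 1
--         while j < n and old_labels[j] == label:
--             j += 1
--         if label == "O":
--             out += ["O"] * (j - i)
--         else:
--             out += ["B-" + label] + ["I-" + label] * (j - i - 1)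
--         i = j
--     return out
-- ===== Notes on version B (the rewrite author's own statement) =====
-- stated objective: alternative
-- what changed: Replaces the per-index loop with a lookback at old_labels[i-1] by a group-then-expand traversal over maximal runs of equal labels, emitting one 'B-' per run and 'I-' for the rest (or 'O' repeated).
import Mathlib
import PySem

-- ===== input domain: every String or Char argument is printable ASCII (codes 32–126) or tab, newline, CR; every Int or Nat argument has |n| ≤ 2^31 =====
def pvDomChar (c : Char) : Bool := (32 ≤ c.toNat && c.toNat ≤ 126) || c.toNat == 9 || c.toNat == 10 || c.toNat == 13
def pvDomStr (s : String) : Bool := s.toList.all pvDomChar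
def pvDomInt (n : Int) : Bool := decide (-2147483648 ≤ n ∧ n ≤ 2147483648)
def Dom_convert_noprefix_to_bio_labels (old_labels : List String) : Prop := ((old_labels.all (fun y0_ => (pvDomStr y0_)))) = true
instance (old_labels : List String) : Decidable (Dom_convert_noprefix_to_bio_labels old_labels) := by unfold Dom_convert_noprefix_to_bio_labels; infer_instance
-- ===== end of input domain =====

-- B replaces A's per-index lookback loop by a group-then-expand traversal over maximal runs
-- of equal labels (objective: alternative; same O(n) cost).


-- ===== PORT A =====
def convert_noprefix_to_bio_labels (old_labels : List String) : List String :=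
  (PySem.List.enumerate old_labels).foldl
    (fun new_labels p =>
      let i := p.1
      let label := p.2
      if label == "O" then new_labels ++ ["O"]
      else if i > 0 && (PySem.List.pyGet? old_labels (i - 1) == some label) then
        new_labels ++ ["I-" ++ label]
      else new_labels ++ ["B-" ++ label])
    []

-- ===== PORT B =====
-- run of the head = inner count loop; block emitted per run; recurse on the rest
def pvBioRuns : List String → List String
  | [] => []
  | label :: tl =>
    let run := tl.takeWhile (· == label)
    let block := if label == "O" then List.replicate (run.length + 1) "O"
                 else ("B-" ++ label) :: List.replicate run.length ("I-" ++ label)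
    block ++ pvBioRuns (tl.dropWhile (· == label))
termination_by l => l.length
decreasing_by
  simpa using Nat.lt_succ_of_le (List.length_dropWhile_le (· == label) tl)

def convert_noprefix_to_bio_labels_alt (old_labels : List String) : List String :=
  pvBioRuns old_labels

-- ===== PRECONDITION & SPEC =====
def Spec_convert_noprefix_to_bio_labels (old_labels : List String) (out : List String) : Prop := out = convert_noprefix_to_bio_labels_alt old_labels
instance (old_labels : List String) (out : List String) : Decidable (Spec_convert_noprefix_to_bio_labels old_labels out) := by unfold Spec_convert_noprefix_to_bio_labels; infer_instance

-- ===== CLAIM (what is proved, stated in full; the proofs are below) =====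
def Claim_equal_convert_noprefix_to_bio_labels : Prop := ∀ (old_labels : List String), Dom_convert_noprefix_to_bio_labels old_labels → Spec_convert_noprefix_to_bio_labels old_labels (convert_noprefix_to_bio_labels old_labels)

-- ===== LEMMAS AND PROOFS =====

-- middle form: one-element-at-a-time recursion carrying the previous label
def pvMid (prev : Option String) : List String → List String
  | [] => []
  | l :: tl =>
    (if l == "O" then "O" else if prev == some l then "I-" ++ l else "B-" ++ l)
      :: pvMid (some l) tl

theorem pvMid_length (prev : Option String) (xs : List String) :
    (pvMid prev xs).length = xs.length := by
  induction xs generalizing prev with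
  | nil => rfl
  | cons l tl ih => simp [pvMid, ih]

theorem pvMid_getElem (xs : List String) (prev : Option String) (j : Nat)
    (h : j < xs.length) :
    (pvMid prev xs)[j]'(by rw [pvMid_length]; exact h) =
      (if xs[j] == "O" then "O"
       else if (if j = 0 then prev else some (xs[j-1]'(by omega))) == some xs[j]
       then "I-" ++ xs[j] else "B-" ++ xs[j]) := by
  induction xs generalizing prev j with
  | nil => simp at h
  | cons l tl ih =>
    cases j with
    | zero => simp [pvMid]
    | succ k =>
      have hk : k < tl.length := by simpa using h
      have := ih (some l) k hk
      simp only [pvMid, List.getElem_cons_succ]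
      rw [this]
      cases k with
      | zero => simp
      | succ m => simp

-- ===== A-side: A equals pvMid none =====

theorem pvA_eq_mid (old : List String) :
    convert_noprefix_to_bio_labels old = pvMid none old := by
  have hbody : (fun (new_labels : List String) (p : Int × String) =>
      let i := p.1
      let label := p.2
      if label == "O" then new_labels ++ ["O"]
      else if i > 0 && (PySem.List.pyGet? old (i - 1) == some label) then
        new_labels ++ ["I-" ++ label]
      else new_labels ++ ["B-" ++ label]) =
      (fun new_labels p => new_labels ++
        [if p.2 == "O" then "O"
         else if p.1 > 0 && (PySem.List.pyGet? old (p.1 - 1) == some p.2) then "I-" ++ p.2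
         else "B-" ++ p.2]) := by
    funext a p
    by_cases h1 : p.2 == "O" <;> by_cases h2 : p.1 > 0 && (PySem.List.pyGet? old (p.1 - 1) == some p.2) <;>
      simp [h1, h2]
  unfold convert_noprefix_to_bio_labels
  rw [hbody, PySem.List.foldl_append_singleton_eq_map, List.nil_append]
  apply List.ext_getElem
  · simp [pvMid_length, PySem.List.length_enumerate]
  · intro j hj hj'
    have hjlen : j < old.length := by rw [pvMid_length] at hj'; exact hj'
    rw [List.getElem_map, PySem.List.getElem_enumerate, pvMid_getElem old none j hjlen]
    simp only [Int.zero_add]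
    by_cases hO : old[j] == "O"
    · simp [hO]
    · cases j with
      | zero => simp [hO]
      | succ k =>
        have hget : PySem.List.pyGet? old (((k + 1 : Nat) : Int) - 1) = some (old[k]'(by omega)) := by
          have hk : (((k + 1 : Nat) : Int) - 1) = ((k : Nat) : Int) := by push_cast; ring
          rw [hk, PySem.List.pyGet?_natCast]
          exact List.getElem?_eq_getElem (by omega)
        simp only [hO, hget]
        by_cases he : old[k]'(by omega) = old[k+1]
        · simp [he]
        · simp [he]

-- ===== B-side: B equals pvMid none =====

theorem pvMid_some_of_head_ne (l : String) (tl : List String)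
    (h : ∀ x, tl.head? = some x → x ≠ l) :
    pvMid (some l) tl = pvMid none tl := by
  cases tl with
  | nil => rfl
  | cons x t =>
    have hx : x ≠ l := h x rfl
    simp only [pvMid]
    congr 1
    by_cases hO : x == "O"
    · simp [hO]
    · have : ¬ ((some l : Option String) == some x) = true := by
        simp; exact fun e => hx e.symm
      simp [hO, this]

theorem pvMid_run (l : String) (run tl : List String)
    (hrun : ∀ x ∈ run, x = l) :
    pvMid (some l) (run ++ tl) =
      List.replicate run.length (if l == "O" then "O" else "I-" ++ l) ++ pvMid (some l) tl := by
  induction run with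
  | nil => simp
  | cons r rs ih =>
    have hr : r = l := hrun r (by simp)
    subst hr
    simp only [List.cons_append, pvMid, List.length_cons, List.replicate_succ]
    rw [ih (fun x hx => hrun x (by simp [hx]))]
    congr 1
    by_cases hO : r == "O" <;> simp [hO]

theorem pvB_eq_mid (old : List String) :
    convert_noprefix_to_bio_labels_alt old = pvMid none old := by
  unfold convert_noprefix_to_bio_labels_alt
  generalize hn : old.length = n
  induction n using Nat.strong_induction_on generalizing old with
  | _ n ih =>
    cases old with
    | nil => simp [pvBioRuns, pvMid]
    | cons l tl =>
      subst hn
      have hsplit : tl.takeWhile (· == l) ++ tl.dropWhile (· == l) = tl :=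
        List.takeWhile_append_dropWhile
      have hrun : ∀ x ∈ tl.takeWhile (· == l), x = l := by
        intro x hx
        simpa using List.mem_takeWhile_imp hx
      have hrest := ih (tl.dropWhile (· == l)).length
        (by
          have := List.length_dropWhile_le (· == l) tl
          simp only [List.length_cons]; omega)
        (tl.dropWhile (· == l)) rfl
      have hhead : ∀ x, (tl.dropWhile (· == l)).head? = some x → x ≠ l := by
        intro x hx
        have := List.head?_dropWhile_not (· == l) tl
        rw [hx] at this
        simpa using this
      have hmid : pvMid (some l) tl =
          List.replicate (tl.takeWhile (· == l)).length (if l == "O" then "O" else "I-" ++ l)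
            ++ pvMid none (tl.dropWhile (· == l)) := by
        conv_lhs => rw [← hsplit]
        rw [pvMid_run l _ _ hrun, pvMid_some_of_head_ne l _ hhead]
      rw [pvBioRuns, hrest]
      by_cases hO : l == "O"
      · simp [pvMid, hO, hmid, List.replicate_succ]
      · simp [pvMid, hO, hmid]

-- ===== VERDICT (by name: the statement is the Claim_ definition above) =====
theorem convert_noprefix_to_bio_labels_spec : Claim_equal_convert_noprefix_to_bio_labels := by
  intro old _
  unfold Spec_convert_noprefix_to_bio_labels
  rw [pvA_eq_mid, pvB_eq_mid]
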